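-- pv_equiv track=rewrite | github.com/Ag3497120/verantyx-v6 | arc/world_commands.py | trace_outline_8
-- ===== SOURCE A (Python) =====
-- from collections import Counter, defaultdict
--
-- def _bg(g):
--     c = Counter()
--     for row in g: c.update(row)
--     return c.most_common(1)[0][0]
--
-- def trace_outline_8(g):
--     bg=_bg(g); h,w=len(g),len(g[0]); res=[[bg]*w for _ in range(h)]
--     for r in range(h):
--         for c in range(w):
--             if g[r][c]!=bg:
--                 for dr in [-1,0,1]:
--                     for dc in [-1,0,1]:
--                         if dr==0 and dc==0: continue
--                         nr,nc=r+dr,c+dc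
--                         if not(0<=nr<h and 0<=nc<w) or g[nr][nc]==bg:
--                             res[r][c]=g[r][c]; break
--                     else: continue
--                     break
--     return res
-- ===== SOURCE B (Python) =====
-- from collections import Counter
--
-- def _bg(g):
--     c = Counter()
--     for row in g: c.update(row)
--     return c.most_common(1)[0][0]
--
-- def trace_outline_8(g):
--     bg = _bg(g); h, w = len(g), len(g[0])
--     res = [[bg]*w for _ in range(h)]
--     for dr, dc in ((-1,-1),(-1,0),(-1,1),(0,-1),(0,1),(1,-1),(1,0),(1,1)):
--         res = [[g[r][c] if g[r][c] != bg and (not (0 <= r+dr < h and 0 <= c+dc < w) or g[r+dr][c+dc] == bg)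
--                 else res[r][c]
--                 for c in range(w)] for r in range(h)]
--     return res
-- ===== Notes on version B (the rewrite author's own statement) =====
-- stated objective: alternative
-- what changed: A scans each non-background cell and runs an inner 8-neighbour loop with break/else that mutates a preallocated grid; B hoists the direction loop outermost and functionally rebuilds the whole grid once per offset in eight full-grid passes, with no inner neighbour loop, break or in-place mutation.
import Mathlib
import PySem

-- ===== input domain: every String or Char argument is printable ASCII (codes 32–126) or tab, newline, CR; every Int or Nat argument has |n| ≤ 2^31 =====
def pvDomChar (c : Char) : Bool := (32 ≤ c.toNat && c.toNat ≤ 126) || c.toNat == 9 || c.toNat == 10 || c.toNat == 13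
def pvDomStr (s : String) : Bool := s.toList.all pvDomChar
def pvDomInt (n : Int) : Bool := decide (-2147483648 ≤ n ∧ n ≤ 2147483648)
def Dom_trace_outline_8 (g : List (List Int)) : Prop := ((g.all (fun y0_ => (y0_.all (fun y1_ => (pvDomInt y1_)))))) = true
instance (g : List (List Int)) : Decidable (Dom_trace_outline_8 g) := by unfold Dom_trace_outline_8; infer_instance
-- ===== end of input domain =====

-- B replaces A's per-cell 8-neighbour search with break/else by eight direction-outer full-grid passes
-- that functionally rebuild the grid once per offset (objective: alternative decomposition, same cost).

-- ===== PORT A =====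
-- g[r][c] (indices always nonnegative and in range under Pre_; default never read there)
def pvCell (g : List (List Int)) (r c : Int) : Int :=
  PySem.List.pyGetD (PySem.List.pyGetD g r []) c 0

-- _bg: Counter over the rows, then most_common(1)[0][0] = first key of maximal count in
-- insertion (first-encountered) order; .getD 0 is never read under Pre_ (counter nonempty).
def pyBg (g : List (List Int)) : Int :=
  let cnt := g.foldl (fun d row => row.foldl (fun d x => d.modify x 0 (· + 1)) d)
      (PySem.Dict.empty : PySem.Dict Int Int)
  (((PySem.List.max? cnt.items (fun p => p.2)).map (fun p => p.1)).getD 0)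

-- A's inner dr/dc double loop with break/else: did some neighbour test fire?
def pvHitA (g : List (List Int)) (bg h w r c : Int) : Bool :=
  ([-1, 0, 1] : List Int).any (fun dr =>
    ([-1, 0, 1] : List Int).any (fun dc =>
      if dr = 0 ∧ dc = 0 then false
      else if ¬(0 ≤ r + dr ∧ r + dr < h ∧ 0 ≤ c + dc ∧ c + dc < w) then true
      else decide (pvCell g (r + dr) (c + dc) = bg)))

-- res[r][c] = v  (always in range here)
def pvSet (res : List (List Int)) (r c : Int) (v : Int) : List (List Int) :=
  PySem.List.pySetD res r (PySem.List.pySetD (PySem.List.pyGetD res r []) c v)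

def trace_outline_8 (g : List (List Int)) : List (List Int) :=
  let bg := pyBg g
  let h : Int := g.length
  let w : Int := (PySem.List.pyGetD g 0 []).length
  let res := (PySem.List.pyRange 0 h 1).map (fun _ => PySem.List.pyRepeat [bg] w)
  (PySem.List.pyRange 0 h 1).foldl (fun res r =>
    (PySem.List.pyRange 0 w 1).foldl (fun res c =>
      if pvCell g r c ≠ bg then
        if pvHitA g bg h w r c then pvSet res r c (pvCell g r c) else res
      else res) res) res

-- ===== PORT B =====
def pvDirs : List (Int × Int) := [(-1,-1),(-1,0),(-1,1),(0,-1),(0,1),(1,-1),(1,0),(1,1)]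

-- one direction-outer pass: rebuild the whole grid for offset d
def pvSweepB (g : List (List Int)) (bg h w : Int) (res : List (List Int)) (d : Int × Int) :
    List (List Int) :=
  (PySem.List.pyRange 0 h 1).map (fun r => (PySem.List.pyRange 0 w 1).map (fun c =>
    if pvCell g r c ≠ bg ∧
        (¬(0 ≤ r + d.1 ∧ r + d.1 < h ∧ 0 ≤ c + d.2 ∧ c + d.2 < w) ∨
          pvCell g (r + d.1) (c + d.2) = bg)
    then pvCell g r c else pvCell res r c))

def trace_outline_8_alt (g : List (List Int)) : List (List Int) :=
  let bg := pyBg g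
  let h : Int := g.length
  let w : Int := (PySem.List.pyGetD g 0 []).length
  let res := (PySem.List.pyRange 0 h 1).map (fun _ => PySem.List.pyRepeat [bg] w)
  pvDirs.foldl (pvSweepB g bg h w) res

-- ===== PRECONDITION & SPEC =====
-- Exactly where the Python A returns: g nonempty, some cell exists (else _bg raises IndexError),
-- and every row at least as long as g[0] (else g[r][c] raises IndexError).
def Pre_trace_outline_8 (g : List (List Int)) : Prop :=
  g ≠ [] ∧ (∃ row ∈ g, row ≠ []) ∧
    ∀ row ∈ g, (PySem.List.pyGetD g 0 ([] : List Int)).length ≤ row.length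
instance (g : List (List Int)) : Decidable (Pre_trace_outline_8 g) := by
  unfold Pre_trace_outline_8; infer_instance
def pvWitness_trace_outline_8 : List (List Int) := [[1, 0], [0, 0]]

def Spec_trace_outline_8 (g : List (List Int)) (out : List (List Int)) : Prop :=
  out = trace_outline_8_alt g
instance (g : List (List Int)) (out : List (List Int)) : Decidable (Spec_trace_outline_8 g out) := by
  unfold Spec_trace_outline_8; infer_instance

-- ===== CLAIM (what is proved, stated in full; the proofs are below) =====
def Claim_equal_trace_outline_8 : Prop :=
  ∀ (g : List (List Int)), Dom_trace_outline_8 g → Pre_trace_outline_8 g →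
    Spec_trace_outline_8 g (trace_outline_8 g)

-- ===== LEMMAS AND PROOFS =====

-- the one 8-neighbour test, as a Bool over an offset d
def pvEdgeB (g : List (List Int)) (bg h w r c : Int) (d : Int × Int) : Bool :=
  !(decide (0 ≤ r + d.1 ∧ r + d.1 < h ∧ 0 ≤ c + d.2 ∧ c + d.2 < w)) ||
    decide (pvCell g (r + d.1) (c + d.2) = bg)

-- the canonical outline grid, offsets restricted to es
def pvGrid (g : List (List Int)) (es : List (Int × Int)) : List (List Int) :=
  let bg := pyBg g
  let h : Int := g.length
  let w : Int := (PySem.List.pyGetD g 0 []).length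
  (PySem.List.pyRange 0 h 1).map (fun r => (PySem.List.pyRange 0 w 1).map (fun c =>
    if pvCell g r c ≠ bg ∧ es.any (pvEdgeB g bg h w r c) = true then pvCell g r c else bg))

theorem pv_if_not (X Y : Prop) [Decidable X] [Decidable Y] :
    (if ¬X then true else decide Y) = (!(decide X) || decide Y) := by
  by_cases hx : X <;> simp [hx]

-- A's break/else double loop fires iff some of the 8 offsets passes the edge test
theorem pv_hit_iff (g : List (List Int)) (bg h w r c : Int) :
    pvHitA g bg h w r c = pvDirs.any (pvEdgeB g bg h w r c) := by
  simp only [pvHitA, pvDirs, pvEdgeB, pv_if_not, List.any_cons, List.any_nil]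
  norm_num
  ac_rfl

theorem pv_ite_ite {α : Type} (X Y : Prop) [Decidable X] [Decidable Y] (a b : α) :
    (if X then (if Y then a else b) else b) = if X ∧ Y then a else b := by
  by_cases hx : X <;> by_cases hy : Y <;> simp [hx, hy]

-- one row of A's mutation loop: each cell conditionally overwritten once
theorem pv_rowFold (Q : Nat → Prop) [DecidablePred Q] (u : Nat → Int) (L : List Nat)
    (row : List Int) (c' : Nat) :
    (L.foldl (fun row c => if Q c then row.set c (u c) else row) row)[c']? =
      if c' ∈ L ∧ Q c' then row[c']?.map (fun _ => u c') else row[c']? := by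
  induction L generalizing row with
  | nil => simp
  | cons c₀ L ih =>
    simp only [List.foldl_cons, List.mem_cons]
    by_cases hq : Q c₀
    · rw [if_pos hq, ih]
      by_cases hc : c' = c₀
      · subst hc
        simp only [hq, and_true, true_or, if_pos]
        have hset : (row.set c' (u c'))[c']? = Option.map (fun _ => u c') row[c']? := by
          by_cases hlt : c' < row.length
          · simp [hlt]
          · have h1 : row[c']? = none := List.getElem?_eq_none_iff.mpr (by omega)
            have h2 : (row.set c' (u c'))[c']? = none :=
              List.getElem?_eq_none_iff.mpr (by simp; omega)
            simp [h1, h2]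
        cases hrow : row[c']? <;> split_ifs <;> simp [hset, hrow]
      · rw [List.getElem?_set_ne (by omega)]
        simp [hc]
    · rw [if_neg hq, ih]
      by_cases hc : c' = c₀
      · subst hc; simp [hq]
      · simp [hc]

-- A's inner c-loop only ever rewrites row r: lift it to a single set of row r
theorem pv_innerLift (Q : Nat → Prop) [DecidablePred Q] (u : Nat → Int) (r : Nat)
    (L : List Nat) (res : List (List Int)) :
    L.foldl (fun res c => if Q c then res.set r ((res.getD r []).set c (u c)) else res) res
      = res.set r (L.foldl (fun row c => if Q c then row.set c (u c) else row) (res.getD r [])) := by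
  induction L generalizing res with
  | nil =>
    simp only [List.foldl_nil]
    by_cases hr : r < res.length
    · rw [List.getD_eq_getElem _ _ hr, List.set_getElem_self]
    · rw [List.set_eq_of_length_le (by omega)]
  | cons c₀ L ih =>
    simp only [List.foldl_cons]
    by_cases hq : Q c₀
    · simp only [if_pos hq]
      rw [ih]
      by_cases hr : r < res.length
      · have h1 : res.getD r [] = res[r] := List.getD_eq_getElem _ _ hr
        have h2 : (res.set r (res[r].set c₀ (u c₀))).getD r [] = res[r].set c₀ (u c₀) := by
          rw [List.getD_eq_getElem _ _ (by simpa using hr), List.getElem_set_self]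
        rw [h1, h2, List.set_set]
      · have hge : res.length ≤ r := by omega
        rw [List.set_eq_of_length_le hge, List.set_eq_of_length_le hge,
          List.getD_eq_default _ _ (by omega)]
        rw [List.set_eq_of_length_le hge]
    · simp only [if_neg hq]
      exact ih res

-- A's outer r-loop over distinct rows, row by row
theorem pv_outerFold (F : Nat → List Int → List Int) (R : List Nat) (hnd : R.Nodup)
    (res : List (List Int)) (r' : Nat) :
    (R.foldl (fun res r => res.set r (F r (res.getD r []))) res)[r']? =
      if r' ∈ R then res[r']?.map (F r') else res[r']? := by
  induction R generalizing res with
  | nil => simp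
  | cons r₀ R ih =>
    simp only [List.foldl_cons, List.mem_cons]
    rw [ih (List.Nodup.of_cons hnd)]
    by_cases hc : r' = r₀
    · subst hc
      have hnotin : r' ∉ R := by simpa using (List.nodup_cons.mp hnd).1
      rw [if_neg (by simpa using hnotin), if_pos (Or.inl rfl)]
      by_cases hr : r' < res.length
      · rw [List.getElem?_set_self']
        simp [hr]
      · have h1 : res[r']? = none := List.getElem?_eq_none_iff.mpr (by omega)
        have h2 : (res.set r' (F r' (res.getD r' [])))[r']? = none :=
          List.getElem?_eq_none_iff.mpr (by simp; omega)
        rw [h2, h1]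
        rfl
    · rw [List.getElem?_set_ne (by omega)]
      simp [hc]

-- the whole conditional-overwrite double loop over a fresh h×w grid is a double map
theorem pv_main (Pq : Nat → Nat → Prop) [∀ r c, Decidable (Pq r c)] (v : Nat → Nat → Int)
    (b : Int) (H W : Nat) :
    (List.range H).foldl (fun res r => (List.range W).foldl
        (fun res c => if Pq r c then res.set r ((res.getD r []).set c (v r c)) else res) res)
      ((List.range H).map (fun _ => List.replicate W b))
    = (List.range H).map (fun r => (List.range W).map (fun c => if Pq r c then v r c else b)) := by
  have hfun : (fun (res : List (List Int)) (r : Nat) => (List.range W).foldl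
        (fun res c => if Pq r c then res.set r ((res.getD r []).set c (v r c)) else res) res)
      = fun res r => res.set r ((List.range W).foldl
        (fun row c => if Pq r c then row.set c (v r c) else row) (res.getD r [])) := by
    funext res r
    exact pv_innerLift (Pq r) (v r) r _ res
  rw [hfun]
  apply List.ext_getElem?
  intro r'
  rw [pv_outerFold (fun r row => (List.range W).foldl
      (fun row c => if Pq r c then row.set c (v r c) else row) row) (List.range H)
      List.nodup_range]
  by_cases hr : r' < H
  · rw [if_pos (List.mem_range.mpr hr)]
    simp only [List.getElem?_map, List.getElem?_range, hr, Option.map_some]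
    congr 1
    apply List.ext_getElem?
    intro c'
    rw [pv_rowFold]
    by_cases hc : c' < W
    · simp [hc, List.mem_range]
      split_ifs <;> simp
    · simp [List.mem_range, hc]
  · simp [hr, List.mem_range]

theorem pv_A_eq_grid (g : List (List Int)) : trace_outline_8 g = pvGrid g pvDirs := by
  simp only [trace_outline_8, pvGrid, pv_ite_ite, pv_hit_iff, pvSet,
    PySem.List.pyRange_one, sub_zero, Int.toNat_natCast, zero_add,
    List.foldl_map, List.map_map, Function.comp_def, PySem.List.pyRepeat_singleton,
    PySem.List.pySetD_natCast, PySem.List.pyGetD_natCast]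
  exact pv_main
    (fun r c => pvCell g ↑r ↑c ≠ pyBg g ∧
      pvDirs.any (pvEdgeB g (pyBg g) (↑g.length) (↑(PySem.List.pyGetD g 0 []).length) ↑r ↑c) = true)
    (fun r c => pvCell g ↑r ↑c) (pyBg g) g.length (PySem.List.pyGetD g 0 []).length

theorem pv_edge_iff (g : List (List Int)) (bg h w r c : Int) (d : Int × Int) :
    pvEdgeB g bg h w r c d = true ↔
      (¬(0 ≤ r + d.1 ∧ r + d.1 < h ∧ 0 ≤ c + d.2 ∧ c + d.2 < w) ∨
        pvCell g (r + d.1) (c + d.2) = bg) := by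
  by_cases hb : (0 ≤ r + d.1 ∧ r + d.1 < h ∧ 0 ≤ c + d.2 ∧ c + d.2 < w) <;>
    by_cases he : pvCell g (r + d.1) (c + d.2) = bg <;> simp [pvEdgeB, hb, he]

theorem pv_cell_grid (g : List (List Int)) (es : List (Int × Int)) (r c : Int)
    (hr0 : 0 ≤ r) (hrh : r < (g.length : Int)) (hc0 : 0 ≤ c)
    (hcw : c < ((PySem.List.pyGetD g 0 []).length : Int)) :
    pvCell (pvGrid g es) r c =
      if pvCell g r c ≠ pyBg g ∧
          es.any (pvEdgeB g (pyBg g) (g.length : Int) ((PySem.List.pyGetD g 0 []).length : Int) r c) = true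
      then pvCell g r c else pyBg g := by
  conv_lhs => rw [pvCell, pvGrid]
  rw [PySem.List.pyGetD_map_pyRange_of_nonneg _ _ _ _ hr0 hrh,
    PySem.List.pyGetD_map_pyRange_of_nonneg _ _ _ _ hc0 hcw]

-- one direction-outer pass of B extends the offset set by one element
theorem pv_sweep_grid (g : List (List Int)) (es : List (Int × Int)) (d : Int × Int) :
    pvSweepB g (pyBg g) (g.length : Int) ((PySem.List.pyGetD g 0 []).length : Int)
        (pvGrid g es) d = pvGrid g (es ++ [d]) := by
  unfold pvSweepB
  conv_rhs => rw [pvGrid]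
  apply List.map_congr_left
  intro r hr
  apply List.map_congr_left
  intro c hc
  rw [PySem.List.mem_pyRange_one] at hr hc
  rw [pv_cell_grid g es r c hr.1 hr.2 hc.1 hc.2]
  simp only [← pv_edge_iff g (pyBg g) (g.length : Int)
    ((PySem.List.pyGetD g 0 []).length : Int) r c d]
  simp only [List.any_append, List.any_cons, List.any_nil, Bool.or_false, Bool.or_eq_true]
  split_ifs <;> tauto

theorem pv_sweep_fold (g : List (List Int)) (ds es : List (Int × Int)) :
    ds.foldl (pvSweepB g (pyBg g) (g.length : Int) ((PySem.List.pyGetD g 0 []).length : Int))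
        (pvGrid g es) = pvGrid g (es ++ ds) := by
  induction ds generalizing es with
  | nil => simp
  | cons d ds ih =>
    simp only [List.foldl_cons, pv_sweep_grid]
    rw [ih]
    simp

theorem pv_B_eq_grid (g : List (List Int)) : trace_outline_8_alt g = pvGrid g pvDirs := by
  have hinit : (PySem.List.pyRange 0 (g.length : Int) 1).map
      (fun _ => PySem.List.pyRepeat [pyBg g] ((PySem.List.pyGetD g 0 []).length : Int))
      = pvGrid g [] := by
    unfold pvGrid
    apply List.map_congr_left
    intro r _
    simp [PySem.List.pyRepeat_singleton, List.any_nil, List.map_const',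
      PySem.List.length_pyRange_one]
  simp only [trace_outline_8_alt]
  rw [hinit, pv_sweep_fold]
  simp

-- ===== VERDICT (by name: the statement is the Claim_ definition above) =====
theorem trace_outline_8_spec : Claim_equal_trace_outline_8 := by
  intro g _ _
  unfold Spec_trace_outline_8
  rw [pv_A_eq_grid, pv_B_eq_grid]
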